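-- pv_equiv track=rewrite | github.com/nii8/split_video | make_time/util.py | group_consecutive_ids
-- ===== SOURCE A (Python) =====
-- def group_consecutive_ids(id_list):
--     """
--     将连续的ID分组，保持原始顺序
--
--     Args:
--         id_list: 整数列表，如 [3,1,2,7]
--
--     Returns:
--         list: 分组后的列表，如 [[3], [1,2], [7]]
--     """
--     if not id_list:
--         return []
--
--     result = []
--     current_group = [id_list[0]]
--
--     for i in range(1, len(id_list)):
--         current_id = id_list[i]
--         prev_id = id_list[i - 1]
--
--         # 检查是否连续（当前ID比前一个ID大1）
--         if current_id == prev_id + 1: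
--             current_group.append(current_id)
--         else:
--             # 不连续，开始新的分组
--             result.append(current_group)
--             current_group = [current_id]
--
--     # 添加最后一个分组
--     result.append(current_group)
--
--     return result
-- ===== SOURCE B (Python) =====
-- def group_consecutive_ids(id_list):
--     """Group consecutive ascending ids by scanning run boundaries and slicing out each run."""
--     result = []
--     i, n = 0, len(id_list)
--     while i < n:
--         j = i + 1
--         while j < n and id_list[j] == id_list[j - 1] + 1:
--             j += 1
--         result.append(id_list[i:j])
--         i = j
--     return result
-- ===== Notes on version B (the rewrite author's own statement) =====
-- stated objective: alternative
-- what changed: B drops A's element-by-element current_group accumulator: an inner boundary scan finds the end index of each maximal consecutive run and emits the whole run as one slice.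
import Mathlib
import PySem

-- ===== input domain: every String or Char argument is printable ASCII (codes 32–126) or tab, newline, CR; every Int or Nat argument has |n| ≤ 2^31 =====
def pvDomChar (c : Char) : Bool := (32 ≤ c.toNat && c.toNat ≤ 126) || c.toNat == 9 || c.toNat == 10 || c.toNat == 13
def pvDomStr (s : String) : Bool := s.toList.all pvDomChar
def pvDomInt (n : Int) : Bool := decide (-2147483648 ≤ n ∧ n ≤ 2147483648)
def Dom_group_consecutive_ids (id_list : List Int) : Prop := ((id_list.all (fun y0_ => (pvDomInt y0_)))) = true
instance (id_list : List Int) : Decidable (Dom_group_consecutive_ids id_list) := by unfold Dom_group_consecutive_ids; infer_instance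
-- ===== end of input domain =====

-- B replaces A's element-by-element current_group accumulator with a boundary scan that slices out each maximal run; same O(n) cost, different decomposition.

-- ===== PORT A =====
-- the for-loop over range(1, len): prev carries id_list[i-1], state = (result, current_group)
def loopA (prev : Int) (st : List (List Int) × List Int) : List Int → List (List Int) × List Int
  | [] => st
  | y :: ys =>
    if y = prev + 1 then loopA y (st.1, st.2 ++ [y]) ys
    else loopA y (st.1 ++ [st.2], [y]) ys

def group_consecutive_ids (id_list : List Int) : List (List Int) :=
  match id_list with
  | [] => []
  | x :: xs =>
    let st := loopA x ([], [x]) xs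
    st.1 ++ [st.2]

-- ===== PORT B =====
-- inner while: advance j while id_list[j] == id_list[j-1] + 1
def runEnd (L : List Int) (j : Nat) : Nat :=
  if j < L.length ∧ PySem.List.pyGetD L (j : Int) 0 = PySem.List.pyGetD L ((j : Int) - 1) 0 + 1 then
    runEnd L (j + 1)
  else j
termination_by L.length - j
decreasing_by omega

theorem runEnd_ge (L : List Int) (j : Nat) : j ≤ runEnd L j := by
  rw [runEnd]
  split
  · exact le_trans (by omega) (runEnd_ge L (j + 1))
  · exact le_refl j
termination_by L.length - j
decreasing_by omega

-- outer while: emit slice id_list[i:j] per run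
def outerB (L : List Int) (i : Nat) : List (List Int) :=
  if i < L.length then
    let j := runEnd L (i + 1)
    PySem.List.slice L (some (i : Int)) (some ((j : Nat) : Int)) :: outerB L j
  else []
termination_by L.length - i
decreasing_by have := runEnd_ge L (i + 1); omega

def group_consecutive_ids_alt (id_list : List Int) : List (List Int) := outerB id_list 0

-- ===== PRECONDITION & SPEC =====
def Spec_group_consecutive_ids (id_list : List Int) (out : List (List Int)) : Prop := out = group_consecutive_ids_alt id_list
instance (id_list : List Int) (out : List (List Int)) : Decidable (Spec_group_consecutive_ids id_list out) := by unfold Spec_group_consecutive_ids; infer_instance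

-- ===== CLAIM (what is proved, stated in full; the proofs are below) =====
def Claim_equal_group_consecutive_ids : Prop := ∀ (id_list : List Int), Dom_group_consecutive_ids id_list → Spec_group_consecutive_ids id_list (group_consecutive_ids id_list)

-- ===== LEMMAS AND PROOFS =====

-- proof intermediary: run-splitting recursion both ports are reduced to
def splitRun (prev : Int) : List Int → List Int × List Int
  | [] => ([], [])
  | y :: ys =>
    if y = prev + 1 then
      let p := splitRun y ys
      (y :: p.1, p.2)
    else ([], y :: ys)

theorem splitRun_len (prev : Int) (xs : List Int) :
    (splitRun prev xs).2.length ≤ xs.length := by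
  induction xs generalizing prev with
  | nil => simp [splitRun]
  | cons y ys ih =>
    simp only [splitRun]
    split
    · exact le_trans (ih y) (by simp)
    · simp

def altB : List Int → List (List Int)
  | [] => []
  | x :: xs => (x :: (splitRun x xs).1) :: altB (splitRun x xs).2
termination_by L => L.length
decreasing_by have := splitRun_len x xs; simpa using Nat.lt_succ_of_le this

theorem splitRun_append (prev : Int) (xs : List Int) :
    (splitRun prev xs).1 ++ (splitRun prev xs).2 = xs := by
  induction xs generalizing prev with
  | nil => simp [splitRun]
  | cons y ys ih => simp only [splitRun]; split <;> simp [ih]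

-- A reduces to altB
theorem loopA_spec (xs : List Int) (prev : Int) (res : List (List Int)) (cur : List Int) :
    (loopA prev (res, cur) xs).1 ++ [(loopA prev (res, cur) xs).2]
      = res ++ ((cur ++ (splitRun prev xs).1) :: altB (splitRun prev xs).2) := by
  induction xs generalizing prev res cur with
  | nil => simp [loopA, splitRun, altB]
  | cons y ys ih =>
    simp only [loopA, splitRun]
    by_cases h : y = prev + 1
    · simp only [if_pos h]
      rw [ih y res (cur ++ [y])]
      simp
    · simp only [if_neg h]
      rw [ih y (res ++ [cur]) [y]]
      simp [altB]

theorem portA_eq_altB (L : List Int) : group_consecutive_ids L = altB L := by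
  cases L with
  | nil => simp [group_consecutive_ids, altB]
  | cons x xs =>
    show (loopA x ([], [x]) xs).1 ++ [(loopA x ([], [x]) xs).2] = _
    rw [loopA_spec xs x [] [x]]
    simp [altB]

-- B reduces to altB
theorem pyGetD_drop (L : List Int) (i : Nat) (x : Int) (xs : List Int)
    (h : L.drop i = x :: xs) : PySem.List.pyGetD L (i : Int) 0 = x := by
  have h9 : L[i]? = some x := by
    have := List.getElem?_drop (xs := L) (i := i) (j := 0)
    simp [h] at this
    simpa using this.symm
  rw [PySem.List.pyGetD_natCast, List.getD_eq_getElem?_getD, h9]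
  rfl

theorem runEnd_drop (L : List Int) (xs : List Int) (x : Int) (i : Nat)
    (h : L.drop i = x :: xs) :
    runEnd L (i + 1) = i + 1 + (splitRun x xs).1.length := by
  induction xs generalizing i x with
  | nil =>
    have hlen : L.length = i + 1 := by
      have := congrArg List.length h
      simp at this
      omega
    rw [runEnd]
    rw [if_neg (by omega)]
    simp [splitRun]
  | cons y ys ih =>
    have hd : L.drop (i + 1) = y :: ys := by
      rw [← List.tail_drop, h]
      rfl
    have h1 : PySem.List.pyGetD L (((i + 1 : Nat)) : Int) 0 = y :=
      pyGetD_drop L (i + 1) y ys hd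
    have h0 : PySem.List.pyGetD L (i : Int) 0 = x := pyGetD_drop L i x (y :: ys) h
    have hi1 : i + 1 < L.length := by
      by_contra hc
      rw [List.drop_eq_nil_of_le (by omega)] at hd
      simp at hd
    have hm : (((i + 1 : Nat)) : Int) - 1 = (i : Int) := by push_cast; ring
    rw [runEnd]
    by_cases hy : y = x + 1
    · rw [if_pos ⟨hi1, by rw [hm, h1, h0, hy]⟩]
      rw [ih y (i + 1) hd]
      simp only [splitRun, if_pos hy]
      simp; omega
    · rw [if_neg (by
        rintro ⟨-, heq⟩
        rw [hm, h1, h0] at heq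
        exact hy heq)]
      simp only [splitRun, if_neg hy]
      simp

theorem outerB_eq_altB (L : List Int) (i : Nat) :
    outerB L i = altB (L.drop i) := by
  by_cases hi : i < L.length
  · obtain ⟨x, xs, h⟩ : ∃ x xs, L.drop i = x :: xs := by
      cases hd : L.drop i with
      | nil => exact absurd (by simpa using congrArg List.length hd) (by omega)
      | cons a as => exact ⟨a, as, rfl⟩
    rw [outerB, if_pos hi]
    show PySem.List.slice L (some (i : Int)) (some ((runEnd L (i + 1) : Nat) : Int))
        :: outerB L (runEnd L (i + 1)) = altB (L.drop i)
    have hre := runEnd_drop L xs x i h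
    have hd1 : L.drop (i + 1) = xs := by
      rw [← List.tail_drop, h]
      rfl
    have htake : xs.take (splitRun x xs).1.length = (splitRun x xs).1 := by
      set p := splitRun x xs with hp
      rw [← splitRun_append x xs, ← hp]
      exact List.take_left
    have hslice : PySem.List.slice L (some (i : Int)) (some ((runEnd L (i + 1) : Nat) : Int))
        = x :: (splitRun x xs).1 := by
      rw [PySem.List.slice_natCast, h, hre]
      have he : i + 1 + (splitRun x xs).1.length - i = (splitRun x xs).1.length + 1 := by omega
      rw [he, List.take_succ_cons, htake]
    have hdrop : L.drop (runEnd L (i + 1)) = (splitRun x xs).2 := by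
      rw [hre]
      set p := splitRun x xs with hp
      rw [← List.drop_drop, hd1, ← splitRun_append x xs, ← hp]
      exact List.drop_left
    rw [hslice, outerB_eq_altB L (runEnd L (i + 1)), hdrop, h, altB]
  · rw [outerB, if_neg hi, List.drop_eq_nil_of_le (by omega), altB]
termination_by L.length - i
decreasing_by have := runEnd_ge L (i + 1); omega

-- ===== VERDICT (by name: the statement is the Claim_ definition above) =====
theorem group_consecutive_ids_spec : Claim_equal_group_consecutive_ids := by
  intro L _
  unfold Spec_group_consecutive_ids group_consecutive_ids_alt
  rw [portA_eq_altB, outerB_eq_altB]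
  simp
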